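-- pv_equiv track=rewrite | github.com/Wbx0710/HuPERWM | huperwm/env/asr.py | phones_to_words
-- ===== SOURCE A (Python) =====
-- from typing import Dict, List, Optional, Tuple
--
-- def phones_to_words(phones: List[str], silence: str = "SIL") -> List[str]:
--     """Split a phone sequence into words at silence boundaries."""
--     if not phones:
--         return []
--     words: List[str] = []
--     current: List[str] = []
--     for ph in phones:
--         if ph.upper() == silence or ph in ("|", " "):
--             if current:
--                 words.append(" ".join(current))
--                 current = []
--         else:
--             current.append(ph)
--     if current:
--         words.append(" ".join(current))
--     return words
-- ===== SOURCE B (Python) =====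
-- from typing import List
--
--
-- def phones_to_words(phones: List[str], silence: str = "SIL") -> List[str]:
--     """Split a phone sequence into words at silence boundaries."""
--
--     def is_sep(ph: str) -> bool:
--         return ph.upper() == silence or ph in ("|", " ")
--
--     words: List[str] = []
--     i, n = 0, len(phones)
--     while i < n:
--         if is_sep(phones[i]):
--             i += 1
--         else:
--             j = i + 1
--             while j < n and not is_sep(phones[j]):
--                 j += 1
--             words.append(" ".join(phones[i:j]))
--             i = j
--     return words
-- ===== Notes on version B (the rewrite author's own statement) =====
-- stated objective: alternative
-- what changed: Replaces A's single accumulate-and-flush pass (pending-word list flushed at each separator, plus a final flush) with a run scanner: skip separators, otherwise find the end of the non-separator run, join that slice as a word and jump past it; no accumulator and no final flush.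
import Mathlib
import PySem

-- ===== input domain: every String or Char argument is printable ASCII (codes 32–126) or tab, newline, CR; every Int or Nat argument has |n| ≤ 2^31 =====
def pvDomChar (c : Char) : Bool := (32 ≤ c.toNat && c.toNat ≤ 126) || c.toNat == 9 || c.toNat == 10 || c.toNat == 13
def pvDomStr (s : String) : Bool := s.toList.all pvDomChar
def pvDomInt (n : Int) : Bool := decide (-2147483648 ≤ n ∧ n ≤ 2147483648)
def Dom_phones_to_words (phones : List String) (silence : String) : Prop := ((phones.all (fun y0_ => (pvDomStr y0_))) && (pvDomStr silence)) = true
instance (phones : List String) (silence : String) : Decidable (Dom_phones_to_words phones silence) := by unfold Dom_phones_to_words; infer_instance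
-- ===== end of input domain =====

-- B replaces A's accumulate-and-flush pass by a run scanner: skip a separator, otherwise
-- scan to the end of the non-separator run, join that slice, continue after it (alternative decomposition, same cost).


-- ===== PORT A =====
def ptwStep (silence : String) (st : List String × List String) (ph : String) : List String × List String :=
  if PySem.Str.upper ph == silence || ph == "|" || ph == " " then
    if st.2 ≠ [] then (st.1 ++ [PySem.Str.join " " st.2], []) else st
  else (st.1, st.2 ++ [ph])

def phones_to_words (phones : List String) (silence : String) : List String :=
  if phones = [] then []
  else
    let st := phones.foldl (ptwStep silence) ([], [])
    if st.2 ≠ [] then st.1 ++ [PySem.Str.join " " st.2] else st.1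

-- ===== PORT B =====
def ptwIsSep (silence : String) (ph : String) : Bool :=
  PySem.Str.upper ph == silence || ph == "|" || ph == " "

-- The inner 'while j < n and not is_sep' scan and the slice phones[i:j] are ported as
-- takeWhile/dropWhile on the current suffix; the outer while loop is this recursion.
def ptwScan (silence : String) : List String → List String
  | [] => []
  | ph :: rest =>
    if ptwIsSep silence ph then ptwScan silence rest
    else
      PySem.Str.join " " (ph :: rest.takeWhile (fun p => !ptwIsSep silence p)) ::
        ptwScan silence (rest.dropWhile (fun p => !ptwIsSep silence p))
  termination_by xs => xs.length
  decreasing_by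
    · simp
    · have := List.length_dropWhile_le (fun p => !ptwIsSep silence p) rest
      simp
      omega

def phones_to_words_alt (phones : List String) (silence : String) : List String :=
  ptwScan silence phones

-- ===== PRECONDITION & SPEC =====
def Spec_phones_to_words (phones : List String) (silence : String) (out : List String) : Prop := out = phones_to_words_alt phones silence
instance (phones : List String) (silence : String) (out : List String) : Decidable (Spec_phones_to_words phones silence out) := by unfold Spec_phones_to_words; infer_instance

-- ===== CLAIM (what is proved, stated in full; the proofs are below) =====
def Claim_equal_phones_to_words : Prop := ∀ (phones : List String) (silence : String), Dom_phones_to_words phones silence → Spec_phones_to_words phones silence (phones_to_words phones silence)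

-- ===== LEMMAS AND PROOFS =====

-- A's final flush, as a function of the fold state.
def ptwFinish (st : List String × List String) : List String :=
  if st.2 ≠ [] then st.1 ++ [PySem.Str.join " " st.2] else st.1

-- One step of ptwScan written with takeWhile/dropWhile of the whole list.
theorem ptwScan_eq_take_drop (silence : String) (xs : List String) :
    ptwScan silence xs =
      (if xs.takeWhile (fun p => !ptwIsSep silence p) = [] then []
       else [PySem.Str.join " " (xs.takeWhile (fun p => !ptwIsSep silence p))]) ++
      ptwScan silence (xs.dropWhile (fun p => !ptwIsSep silence p)) := by
  cases xs with
  | nil => simp [ptwScan]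
  | cons ph rest =>
    by_cases h : ptwIsSep silence ph
    · simp [ptwScan, h]
    · simp [ptwScan, h]

-- Invariant of A's fold: finishing from state (w, c) yields w, then the word pending in c
-- merged with the leading run, then ptwScan of the remainder.
theorem ptwFold_invariant (silence : String) (xs : List String) :
    ∀ (w c : List String),
      ptwFinish (xs.foldl (ptwStep silence) (w, c)) =
        w ++ (if c ++ xs.takeWhile (fun p => !ptwIsSep silence p) = [] then []
              else [PySem.Str.join " " (c ++ xs.takeWhile (fun p => !ptwIsSep silence p))]) ++
          ptwScan silence (xs.dropWhile (fun p => !ptwIsSep silence p)) := by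
  induction xs with
  | nil =>
    intro w c
    cases c with
    | nil => simp [ptwFinish, ptwScan]
    | cons a l => simp [ptwFinish, ptwScan]
  | cons ph rest ih =>
    intro w c
    by_cases h : ptwIsSep silence ph = true
    · have hb : (PySem.Str.upper ph == silence || ph == "|" || ph == " ") = true := h
      have hT : (ph :: rest).takeWhile (fun p => !ptwIsSep silence p) = [] := by
        simp [h]
      have hD : (ph :: rest).dropWhile (fun p => !ptwIsSep silence p) = ph :: rest := by
        simp [h]
      have hS : ptwScan silence (ph :: rest) = ptwScan silence rest := by
        rw [ptwScan]; simp [h]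
      rw [hT, hD, hS, ptwScan_eq_take_drop silence rest]
      by_cases hc : c = []
      · subst hc
        have hstep : ptwStep silence (w, []) ph = (w, []) := by simp [ptwStep, hb]
        rw [List.foldl_cons, hstep, ih w []]
        simp
      · have hstep : ptwStep silence (w, c) ph = (w ++ [PySem.Str.join " " c], []) := by
          simp [ptwStep, hb, hc]
        rw [List.foldl_cons, hstep, ih (w ++ [PySem.Str.join " " c]) []]
        simp [hc]
    · have h' : (¬(PySem.Str.upper ph = silence) ∧ ¬(ph = "|")) ∧ ¬(ph = " ") := by
        simpa [ptwIsSep] using h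
      have hb : (PySem.Str.upper ph == silence || ph == "|" || ph == " ") = false := by
        simp [h'.1.1, h'.1.2, h'.2]
      have hT : (ph :: rest).takeWhile (fun p => !ptwIsSep silence p) =
          ph :: rest.takeWhile (fun p => !ptwIsSep silence p) := by
        simp [ptwIsSep, h'.1.1, h'.1.2, h'.2]
      have hD : (ph :: rest).dropWhile (fun p => !ptwIsSep silence p) =
          rest.dropWhile (fun p => !ptwIsSep silence p) := by
        simp [ptwIsSep, h'.1.1, h'.1.2, h'.2]
      have hstep : ptwStep silence (w, c) ph = (w, c ++ [ph]) := by
        simp [ptwStep, hb]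
      rw [hT, hD, List.foldl_cons, hstep, ih w (c ++ [ph])]
      simp

-- ===== VERDICT (by name: the statement is the Claim_ definition above) =====
theorem phones_to_words_spec : Claim_equal_phones_to_words := by
  intro phones silence _
  unfold Spec_phones_to_words phones_to_words phones_to_words_alt
  by_cases hnil : phones = []
  · simp [hnil, ptwScan]
  · simp only [hnil, if_false]
    have := ptwFold_invariant silence phones [] []
    simp only [List.nil_append] at this
    rw [show (if (phones.foldl (ptwStep silence) ([], [])).2 ≠ [] then
          (phones.foldl (ptwStep silence) ([], [])).1 ++
            [PySem.Str.join " " (phones.foldl (ptwStep silence) ([], [])).2]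
        else (phones.foldl (ptwStep silence) ([], [])).1) =
        ptwFinish (phones.foldl (ptwStep silence) ([], [])) from rfl, this,
      ← ptwScan_eq_take_drop]
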